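-- pv_equiv track=rewrite | github.com/Ayaanator/ISC3U0 | connect_four.py | check_left_diagonal
-- ===== SOURCE A (Python) =====
-- def check_left_diagonal(board: list, player: str, connects_to_win: int) -> str:
--     """Check for four in a row diagonally left to right"""
--
--     # Search diagonally left to right
--     while len(board[0]) > 3:
--         counter = 0
--         main_counter = 0
--
--         # Move down the leftmost column in a loop
--         while main_counter < len(board):
--             y_counter = main_counter
--             x_counter = 0
--
--             # Move left-right diagonally
--             while x_counter < main_counter + 1 and y_counter > -1 and x_counter < len(board[0]):
--                 test = board[y_counter][x_counter]
--                 if test == player: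
--                     counter += 1
--                     if counter == connects_to_win:
--                         # Four in a row
--                         return player
--                 else:
--                     counter = 0
--
--                 # Move up and right
--                 y_counter -= 1
--                 x_counter += 1
--
--             main_counter += 1
--             counter = 0
--
--         # Split board from left to reiterate search loop over next column
--         board = split_board(board, True)
--         counter = 0
--
--     return "⚪"
--
-- def split_board(board: list, left: bool) -> list:
--     """Split one column from the left or right side of board and return it.
--
--     >>> split_board([["🔘", "🔘", "🔘", "🔘", "🔘", "🔘", "🔘"],
--                      ["🔘", "🔘", "🔘", "🔘", "🔘", "🔘", "🔘"],
--                      ["🔘", "🔘", "🔘", "🔘", "🔘", "🔘", "🔘"],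
--                      ["🔘", "🔘", "🔘", "🔘", "🟡", "🔴", "🔘"],
--                      ["🔘", "🔘", "🟡", "🟡", "🔴", "🟡", "🔘"],
--                      ["🟡", "🔘", "🟡", "🔴", "🔴", "🔴", "🔘"]], True)
--
--     [["🔘", "🔘", "🔘", "🔘", "🔘", "🔘"],
--      ["🔘", "🔘", "🔘", "🔘", "🔘", "🔘"],
--      ["🔘", "🔘", "🔘", "🔘", "🔘", "🔘"],
--      ["🔘", "🔘", "🔘", "🟡", "🔴", "🔘"],
--      ["🔘", "🟡", "🟡", "🔴", "🟡", "🔘"],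
--      ["🔘", "🟡", "🔴", "🔴", "🔴", "🔘"]]
--
--     >>> split_board([["🔘", "🔘", "🔘", "🔘", "🔘", "🔘", "🔘"],
--                      ["🔘", "🔘", "🔘", "🔘", "🔘", "🔘", "🔘"],
--                      ["🔘", "🔘", "🔘", "🔘", "🔘", "🔘", "🔘"],
--                      ["🔘", "🔘", "🔘", "🔘", "🟡", "🔴", "🔘"],
--                      ["🔘", "🔘", "🟡", "🟡", "🔴", "🟡", "🔘"],
--                      ["🟡", "🔘", "🟡", "🔴", "🔴", "🔴", "🔘"]], False)
--
--     [["🔘", "🔘", "🔘", "🔘", "🔘", "🔘"],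
--      ["🔘", "🔘", "🔘", "🔘", "🔘", "🔘"],
--      ["🔘", "🔘", "🔘", "🔘", "🔘", "🔘"],
--      ["🔘", "🔘", "🔘", "🔘", "🟡", "🔴"],
--      ["🔘", "🔘", "🟡", "🟡", "🔴", "🟡"],
--      ["🟡", "🔘", "🟡", "🔴", "🔴", "🔴"]]
--     """
--
--     result = []
--
--     # Strip left column
--     if left == True:
--         for row in board:
--             new_row = []
--
--             for i in range(1, len(board[0]), 1):
--                 new_row += [row[i]]
--
--             result += [new_row]
--     else:
--         # Strip right column
--         for row in board:
--             new_row = []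
--
--             for i in range(0, len(board[0]) - 1, 1):
--                 new_row += [row[i]]
--
--             result += [new_row]
--
--     return result
-- ===== SOURCE B (Python) =====
-- def check_left_diagonal(board: list, player: str, connects_to_win: int) -> str:
--     """Single pass: scan each maximal anti-diagonal once (left-column starts,
--     and bottom-row starts that leave room for four), no board copying."""
--     height = len(board)
--     width = len(board[0])
--     if width <= 3:
--         return "⚪"
--     starts = [(r, 0) for r in range(height)] + [(height - 1, c) for c in range(1, width - 3)]
--     for r0, c0 in starts:
--         run = 0
--         y, x = r0, c0
--         while y >= 0 and x < width:
--             if board[y][x] == player: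
--                 run += 1
--                 if run == connects_to_win:
--                     return player
--             else:
--                 run = 0
--             y -= 1
--             x += 1
--     return "⚪"
-- ===== Notes on version B (the rewrite author's own statement) =====
-- stated objective: faster
-- what changed: B removes A's repeated split_board board copies and per-row rescans: it scans each maximal anti-diagonal exactly once, starting from precomputed start cells (left column, and bottom-row columns that leave room for four) and walking up-right with a streak counter.
-- outside the precondition, e.g. on check_left_diagonal([['p', 'p', 'p', 'p'], ['x']], 'p', 1): A returns 'p', B returns 'p'
import Mathlib
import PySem

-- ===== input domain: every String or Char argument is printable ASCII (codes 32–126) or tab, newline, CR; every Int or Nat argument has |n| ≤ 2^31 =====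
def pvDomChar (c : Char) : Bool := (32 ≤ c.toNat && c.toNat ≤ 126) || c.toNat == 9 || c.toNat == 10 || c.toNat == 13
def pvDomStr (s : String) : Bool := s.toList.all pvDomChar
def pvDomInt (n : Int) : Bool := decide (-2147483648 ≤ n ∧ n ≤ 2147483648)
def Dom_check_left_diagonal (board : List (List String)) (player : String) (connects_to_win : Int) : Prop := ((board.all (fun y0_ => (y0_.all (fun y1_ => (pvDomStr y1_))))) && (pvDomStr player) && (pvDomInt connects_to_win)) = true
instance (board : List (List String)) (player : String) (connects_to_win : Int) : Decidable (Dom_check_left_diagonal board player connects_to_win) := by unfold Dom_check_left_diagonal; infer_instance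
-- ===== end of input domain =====

-- B is a single pass: one scan per maximal anti-diagonal (no repeated board copying); equal to A on Pre_.
-- Loops are ported with an explicit fuel argument equal to the loop's exact iteration bound (a totality guard only).

-- ===== PORT A =====
-- helper split_board(board, left): strips the left (or right) column, row by row
def split_board (board : List (List String)) (left : Bool) : List (List String) :=
  if left = true then
    board.foldl (fun result row =>
      result ++ [(PySem.List.pyRange 1 ((board.headD []).length : Int) 1).foldl
        (fun new_row i => new_row ++ [PySem.List.pyGetD row i ""]) []]) []
  else
    board.foldl (fun result row =>
      result ++ [(PySem.List.pyRange 0 (((board.headD []).length : Int) - 1) 1).foldl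
        (fun new_row i => new_row ++ [PySem.List.pyGetD row i ""]) []]) []

-- innermost while loop of A (move up-right along the diagonal); true = "return player" was hit;
-- fuel = (y_counter + 1).toNat bounds the iterations (y_counter decreases, loop stops at y_counter = -1)
def pvA_inner (board : List (List String)) (player : String) (connects_to_win : Int)
    (main_counter : Int) : Nat → Int → Int → Int → Bool
  | 0, _, _, _ => false
  | fuel + 1, counter, y_counter, x_counter =>
    if x_counter < main_counter + 1 ∧ y_counter > -1 ∧ x_counter < ((board.headD []).length : Int) then
      if PySem.List.pyGetD (PySem.List.pyGetD board y_counter []) x_counter "" = player then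
        if counter + 1 = connects_to_win then true
        else pvA_inner board player connects_to_win main_counter fuel (counter + 1) (y_counter - 1) (x_counter + 1)
      else pvA_inner board player connects_to_win main_counter fuel 0 (y_counter - 1) (x_counter + 1)
    else false

-- middle while loop of A (move down the leftmost column); fuel = number of remaining rows
def pvA_middle (board : List (List String)) (player : String) (connects_to_win : Int) :
    Nat → Int → Bool
  | 0, _ => false
  | fuel + 1, main_counter =>
    if main_counter < (board.length : Int) then
      if pvA_inner board player connects_to_win main_counter (main_counter + 1).toNat 0 main_counter 0 then true
      else pvA_middle board player connects_to_win fuel (main_counter + 1)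
    else false

-- outer while loop of A (re-run the search on the board with the left column stripped);
-- fuel = current first-row length (split_board shortens it by 1 each iteration)
def pvA_outer (player : String) (connects_to_win : Int) : Nat → List (List String) → String
  | 0, _ => "⚪"
  | fuel + 1, board =>
    if 3 < ((board.headD []).length : Int) then
      if pvA_middle board player connects_to_win board.length 0 then player
      else pvA_outer player connects_to_win fuel (split_board board true)
    else "⚪"

def check_left_diagonal (board : List (List String)) (player : String) (connects_to_win : Int) : String :=
  pvA_outer player connects_to_win (board.headD []).length board

-- ===== PORT B =====
-- B's while loop: scan one anti-diagonal from (y, x) going up-right, counting the current streak;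
-- fuel = (y + 1).toNat bounds the iterations (y decreases, loop stops below 0)
def pvB_scan (board : List (List String)) (player : String) (connects_to_win : Int)
    (width : Int) : Nat → Int → Int → Int → Option String
  | 0, _, _, _ => none
  | fuel + 1, run, y, x =>
    if y ≥ 0 ∧ x < width then
      if PySem.List.pyGetD (PySem.List.pyGetD board y []) x "" = player then
        if run + 1 = connects_to_win then some player
        else pvB_scan board player connects_to_win width fuel (run + 1) (y - 1) (x + 1)
      else pvB_scan board player connects_to_win width fuel 0 (y - 1) (x + 1)
    else none

-- B's for loop over the start cells, with early return
def pvB_loop (board : List (List String)) (player : String) (connects_to_win : Int)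
    (width : Int) : List (Int × Int) → String
  | [] => "⚪"
  | (r0, c0) :: rest =>
    match pvB_scan board player connects_to_win width (r0 + 1).toNat 0 r0 c0 with
    | some p => p
    | none => pvB_loop board player connects_to_win width rest

def check_left_diagonal_alt (board : List (List String)) (player : String) (connects_to_win : Int) : String :=
  let height : Int := (board.length : Int)
  let width : Int := ((board.headD []).length : Int)
  if width ≤ 3 then "⚪"
  else
    let starts : List (Int × Int) :=
      (PySem.List.pyRange 0 height 1).map (fun r => (r, (0 : Int)))
        ++ (PySem.List.pyRange 1 (width - 3) 1).map (fun c => (height - 1, c))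
    pvB_loop board player connects_to_win width starts

-- ===== PRECONDITION & SPEC =====
-- Pre_ excludes the empty board and (when the first row has ≥ 4 cells) boards with a row shorter
-- than the first row: there A raises IndexError — in split_board, or while scanning — unless it
-- happens to find a win first (see cites).
def Pre_check_left_diagonal (board : List (List String)) (player : String) (connects_to_win : Int) : Prop :=
  board ≠ [] ∧ ((board.headD []).length ≤ 3 ∨ ∀ row ∈ board, (board.headD []).length ≤ row.length)
instance (board : List (List String)) (player : String) (connects_to_win : Int) : Decidable (Pre_check_left_diagonal board player connects_to_win) := by unfold Pre_check_left_diagonal; infer_instance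

def pvWitness_check_left_diagonal : List (List String) × String × Int :=
  ([["x", "p", "p", "x"], ["x", "p", "p", "x"], ["p", "p", "x", "x"], ["p", "x", "x", "p"]], "p", 4)

def Spec_check_left_diagonal (board : List (List String)) (player : String) (connects_to_win : Int) (out : String) : Prop := out = check_left_diagonal_alt board player connects_to_win
instance (board : List (List String)) (player : String) (connects_to_win : Int) (out : String) : Decidable (Spec_check_left_diagonal board player connects_to_win out) := by unfold Spec_check_left_diagonal; infer_instance

-- ===== CLAIM (what is proved, stated in full; the proofs are below) =====
def Claim_equal_check_left_diagonal : Prop := ∀ (board : List (List String)) (player : String) (connects_to_win : Int), Dom_check_left_diagonal board player connects_to_win → Pre_check_left_diagonal board player connects_to_win → Spec_check_left_diagonal board player connects_to_win (check_left_diagonal board player connects_to_win)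

-- ===== LEMMAS AND PROOFS =====

-- split_board stripping the left column is a map over the rows
theorem pv_split_eq_map (b : List (List String)) :
    split_board b true = b.map (fun row =>
      (PySem.List.pyRange 1 ((b.headD []).length : Int) 1).map (fun i => PySem.List.pyGetD row i "")) := by
  simp only [split_board, reduceIte, PySem.List.foldl_append_singleton_eq_map, List.nil_append]

-- a cell of the stripped board is the cell one column to the right of the original
theorem pv_cell_split (b : List (List String)) (y x : Int)
    (hy : 0 ≤ y) (hylt : y < (b.length : Int)) (hx : 0 ≤ x) (hxlt : x < ((b.headD []).length : Int) - 1) :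
    PySem.List.pyGetD (PySem.List.pyGetD (split_board b true) y []) x ""
      = PySem.List.pyGetD (PySem.List.pyGetD b y []) (x + 1) "" := by
  rw [pv_split_eq_map]
  rw [PySem.List.pyGetD_eq_getElem _ _ hy (by simpa using hylt),
      PySem.List.pyGetD_eq_getElem _ _ hy (by simpa using hylt)]
  rw [List.getElem_map]
  have hx' : x = (x.toNat : Int) := (Int.toNat_of_nonneg hx).symm
  rw [hx', PySem.List.pyGetD_map_pyRange_one _ 1 _ x.toNat "" (by omega)]
  rw [add_comm]

-- scanning a diagonal of the stripped board = scanning the original one column to the right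
theorem pv_scan_shift (b : List (List String)) (p : String) (cw : Int) :
    ∀ (k : Nat) (y x run : Int), y < (b.length : Int) → 0 ≤ x →
    pvB_scan (split_board b true) p cw (((b.headD []).length : Int) - 1) k run y x
      = pvB_scan b p cw ((b.headD []).length : Int) k run y (x + 1) := by
  intro k
  induction k with
  | zero => intro y x run hylt hx; rfl
  | succ k ih =>
    intro y x run hylt hx
    show (if y ≥ 0 ∧ x < ((b.headD []).length : Int) - 1 then _ else _)
       = (if y ≥ 0 ∧ x + 1 < ((b.headD []).length : Int) then _ else _)
    by_cases hc : y ≥ 0 ∧ x < ((b.headD []).length : Int) - 1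
    · rw [if_pos hc, if_pos (show y ≥ 0 ∧ x + 1 < ((b.headD []).length : Int) by omega)]
      rw [pv_cell_split b y x (by omega) hylt hx (by omega)]
      by_cases hcell : PySem.List.pyGetD (PySem.List.pyGetD b y []) (x + 1) "" = p
      · rw [if_pos hcell, if_pos hcell]
        by_cases hf : run + 1 = cw
        · rw [if_pos hf, if_pos hf]
        · rw [if_neg hf, if_neg hf]
          exact ih (y - 1) (x + 1) (run + 1) (by omega) (by omega)
      · rw [if_neg hcell, if_neg hcell]
        exact ih (y - 1) (x + 1) 0 (by omega) (by omega)
    · rw [if_neg hc, if_neg (show ¬(y ≥ 0 ∧ x + 1 < ((b.headD []).length : Int)) by omega)]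

-- pvB_scan only ever returns the player
theorem pv_scan_some (b : List (List String)) (p : String) (cw w : Int) :
    ∀ (k : Nat) (run y x : Int) (q : String),
    pvB_scan b p cw w k run y x = some q → q = p := by
  intro k
  induction k with
  | zero => intro run y x q h; exact absurd h (by simp [pvB_scan])
  | succ k ih =>
    intro run y x q h
    rw [pvB_scan] at h
    split_ifs at h with h1 h2 h3
    all_goals first
      | exact (Option.some_inj.mp h).symm
      | exact ih _ _ _ _ h

-- the for loop over start cells is an 'any'
theorem pv_loop_any (b : List (List String)) (p : String) (cw w : Int) (L : List (Int × Int)) :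
    pvB_loop b p cw w L
      = if L.any (fun rc => (pvB_scan b p cw w (rc.1 + 1).toNat 0 rc.1 rc.2).isSome) then p else "⚪" := by
  induction L with
  | nil => simp [pvB_loop]
  | cons rc rest ih =>
    obtain ⟨r0, c0⟩ := rc
    rw [pvB_loop]
    cases hs : pvB_scan b p cw w (r0 + 1).toNat 0 r0 c0 with
    | some q =>
      have := pv_scan_some b p cw w (r0 + 1).toNat 0 r0 c0 q hs
      subst this
      simp [hs]
    | none => simp only [List.any_cons, hs, Option.isSome_none, Bool.false_or, ih]

-- a firing scan implies a positive target
theorem pv_scan_pos (b : List (List String)) (p : String) (cw w : Int) :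
    ∀ (k : Nat) (run y x : Int), 0 ≤ run → (pvB_scan b p cw w k run y x).isSome → 0 < cw := by
  intro k
  induction k with
  | zero => intro run y x h0 h; exact absurd h (by simp [pvB_scan])
  | succ k ih =>
    intro run y x h0 h
    rw [pvB_scan] at h
    split_ifs at h with h1 h2 h3
    all_goals first
      | omega
      | exact ih _ _ _ (by omega) h
      | exact absurd h (by simp)

-- a larger head-start streak (still below the target) fires whenever a smaller one does
theorem pv_scan_mono (b : List (List String)) (p : String) (cw w : Int) :
    ∀ (k : Nat) (y x c1 c2 : Int), 0 ≤ c2 → c2 ≤ c1 → c1 < cw →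
    (pvB_scan b p cw w k c2 y x).isSome → (pvB_scan b p cw w k c1 y x).isSome := by
  intro k
  induction k with
  | zero => intro y x c1 c2 h0 h12 h1 h; exact absurd h (by simp [pvB_scan])
  | succ k ih =>
    intro y x c1 c2 h0 h12 h1 h
    rw [pvB_scan] at h ⊢
    by_cases hc : y ≥ 0 ∧ x < w
    · rw [if_pos hc] at h ⊢
      by_cases hcell : PySem.List.pyGetD (PySem.List.pyGetD b y []) x "" = p
      · rw [if_pos hcell] at h ⊢
        by_cases hf1 : c1 + 1 = cw
        · rw [if_pos hf1]; simp
        · rw [if_neg hf1]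
          by_cases hf2 : c2 + 1 = cw
          · omega
          · rw [if_neg hf2] at h
            exact ih (y - 1) (x + 1) (c1 + 1) (c2 + 1) (by omega) (by omega) (by omega) h
      · rw [if_neg hcell] at h ⊢
        exact h
    · rw [if_neg hc] at h
      exact absurd h (by simp)

-- starting the scan one cell earlier on the same diagonal preserves firing (one more fuel step)
theorem pv_scan_step (b : List (List String)) (p : String) (cw w : Int) (k : Nat) (y x : Int)
    (h : (pvB_scan b p cw w k 0 y x).isSome) :
    (pvB_scan b p cw w (k + 1) 0 (y + 1) (x - 1)).isSome := by
  have hcw : 0 < cw := pv_scan_pos b p cw w k 0 y x (le_refl 0) h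
  have hc : y ≥ 0 ∧ x < w := by
    by_contra hc
    cases k with
    | zero => exact absurd h (by simp [pvB_scan])
    | succ k => rw [pvB_scan, if_neg hc] at h; exact absurd h (by simp)
  rw [pvB_scan, if_pos (by omega)]
  have hy1 : y + 1 - 1 = y := by omega
  have hx1 : x - 1 + 1 = x := by omega
  by_cases hcell : PySem.List.pyGetD (PySem.List.pyGetD b (y + 1) []) (x - 1) "" = p
  · rw [if_pos hcell]
    by_cases hf : (0 : Int) + 1 = cw
    · rw [if_pos hf]; simp
    · rw [if_neg hf, hy1, hx1]
      exact pv_scan_mono b p cw w k y x (0 + 1) 0 (le_refl 0) (by omega) (by omega) h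
  · rw [if_neg hcell, hy1, hx1]
    exact h

-- starting the scan m cells earlier on the same diagonal preserves firing
theorem pv_scan_ext (b : List (List String)) (p : String) (cw w : Int) (k : Nat) (y x : Int) (m : Nat)
    (h : (pvB_scan b p cw w k 0 y x).isSome) :
    (pvB_scan b p cw w (k + m) 0 (y + m) (x - m)).isSome := by
  induction m with
  | zero => simpa using h
  | succ m ih =>
    have hstep := pv_scan_step b p cw w (k + m) (y + (m : Int)) (x - (m : Int)) ih
    have h1 : y + ((m + 1 : Nat) : Int) = y + (m : Int) + 1 := by push_cast; ring
    have h2 : x - ((m + 1 : Nat) : Int) = x - (m : Int) - 1 := by push_cast; ring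
    rw [h1, h2, show k + (m + 1) = k + m + 1 from rfl]
    exact hstep

-- A's innermost loop is B's diagonal scan (on the same board, same fuel)
theorem pv_inner_eq (b : List (List String)) (p : String) (cw : Int) :
    ∀ (k : Nat) (main counter y x : Int), y + x = main →
    pvA_inner b p cw main k counter y x
      = (pvB_scan b p cw ((b.headD []).length : Int) k counter y x).isSome := by
  intro k
  induction k with
  | zero => intro main counter y x hyx; rfl
  | succ k ih =>
    intro main counter y x hyx
    rw [pvA_inner, pvB_scan]
    by_cases hc : y ≥ 0 ∧ x < ((b.headD []).length : Int)
    · rw [if_pos (by omega), if_pos hc]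
      by_cases hcell : PySem.List.pyGetD (PySem.List.pyGetD b y []) x "" = p
      · rw [if_pos hcell, if_pos hcell]
        by_cases hf : counter + 1 = cw
        · rw [if_pos hf, if_pos hf]; rfl
        · rw [if_neg hf, if_neg hf]
          exact ih main (counter + 1) (y - 1) (x + 1) (by omega)
      · rw [if_neg hcell, if_neg hcell]
        exact ih main 0 (y - 1) (x + 1) (by omega)
    · rw [if_neg (by omega), if_neg hc]
      rfl

-- A's middle loop is an 'any' over the left-column starts from m upward
theorem pv_middle_eq (b : List (List String)) (p : String) (cw : Int) :
    ∀ (k : Nat) (m : Int), ((b.length : Int) - m).toNat ≤ k →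
    pvA_middle b p cw k m
      = (PySem.List.pyRange m (b.length : Int) 1).any
          (fun r => (pvB_scan b p cw ((b.headD []).length : Int) (r + 1).toNat 0 r 0).isSome) := by
  intro k
  induction k with
  | zero =>
    intro m hk
    rw [PySem.List.pyRange_one_eq_nil (by omega)]
    rfl
  | succ k ih =>
    intro m hk
    rw [pvA_middle]
    by_cases hm : m < (b.length : Int)
    · rw [if_pos hm, PySem.List.pyRange_one_cons hm, List.any_cons]
      rw [pv_inner_eq b p cw (m + 1).toNat m 0 m 0 (by omega)]
      rw [ih (m + 1) (by omega)]
      cases hfire : (pvB_scan b p cw ((b.headD []).length : Int) (m + 1).toNat 0 m 0).isSome <;> simp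
    · rw [if_neg hm, PySem.List.pyRange_one_eq_nil (by omega)]
      simp

-- unfolding of B's port into guard + 'any' over the start cells
theorem pv_alt_unfold (b : List (List String)) (p : String) (cw : Int) :
    check_left_diagonal_alt b p cw =
      if ((b.headD []).length : Int) ≤ 3 then "⚪"
      else if (((PySem.List.pyRange 0 (b.length : Int) 1).map (fun r => (r, (0 : Int)))
            ++ (PySem.List.pyRange 1 (((b.headD []).length : Int) - 3) 1).map
                (fun c => ((b.length : Int) - 1, c))).any
            (fun rc => (pvB_scan b p cw ((b.headD []).length : Int) (rc.1 + 1).toNat 0 rc.1 rc.2).isSome))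
           then p else "⚪" := by
  simp only [check_left_diagonal_alt]
  by_cases h : ((b.headD []).length : Int) ≤ 3
  · rw [if_pos h, if_pos h]
  · rw [if_neg h, if_neg h, pv_loop_any]

-- the main induction: on any rectangular-enough board the two programs agree
theorem pv_main (n : Nat) (b : List (List String)) (p : String) (cw : Int)
    (hn : (b.headD []).length = n) (hb : b ≠ []) (hrows : ∀ row ∈ b, n ≤ row.length) :
    pvA_outer p cw n b = check_left_diagonal_alt b p cw := by
  induction n using Nat.strong_induction_on generalizing b with
  | _ n ih =>
  by_cases h4 : n ≤ 3
  · rw [pv_alt_unfold, if_pos (by rw [hn]; omega)]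
    cases n with
    | zero => rfl
    | succ m => rw [pvA_outer, if_neg (by rw [hn]; push_cast; omega)]
  -- main case: at least 4 columns
  · have hR : 0 < b.length := List.length_pos_iff.mpr hb
    have hsplit := pv_split_eq_map b
    -- facts about the stripped board b'
    have hlen' : (split_board b true).length = b.length := by rw [hsplit]; simp
    have hb'ne : split_board b true ≠ [] := by
      rw [hsplit]
      cases b with
      | nil => exact absurd rfl hb
      | cons r rs => simp
    have hhead' : ((split_board b true).headD []).length = n - 1 := by
      cases b with
      | nil => exact absurd rfl hb
      | cons r rs =>
        rw [hsplit]
        simp only [List.headD_cons] at hn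
        simp only [List.map_cons, List.headD_cons, List.length_map,
          PySem.List.length_pyRange_one, List.headD_cons, hn]
        omega
    have hrows' : ∀ row ∈ split_board b true, n - 1 ≤ row.length := by
      intro row hrow
      rw [hsplit] at hrow
      obtain ⟨r, hr, hfr⟩ := List.mem_map.mp hrow
      cases b with
      | nil => exact absurd rfl hb
      | cons r0 rs =>
        simp only [List.headD_cons] at hn
        rw [← hfr]
        simp only [List.length_map, PySem.List.length_pyRange_one, List.headD_cons, hn]
        omega
    have IH := ih (n - 1) (by omega) (split_board b true) hhead' hb'ne hrows'
    have hWb' : (((split_board b true).headD []).length : Int) = ((b.headD []).length : Int) - 1 := by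
      rw [hhead', hn]; omega
    have hnInt : (((b.headD []).length : Int)) = (n : Int) := by exact_mod_cast hn
    have hshift : ∀ (k : Nat) (y x : Int), y < (b.length : Int) → 0 ≤ x →
        pvB_scan (split_board b true) p cw (((b.headD []).length : Int) - 1) k 0 y x
          = pvB_scan b p cw ((b.headD []).length : Int) k 0 y (x + 1) :=
      fun k y x h1 h2 => pv_scan_shift b p cw k y x 0 h1 h2
    -- rewrite both programs into guard/any form
    have hAltb : check_left_diagonal_alt b p cw =
        if (((PySem.List.pyRange 0 (b.length : Int) 1).map (fun r => (r, (0 : Int)))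
            ++ (PySem.List.pyRange 1 (((b.headD []).length : Int) - 3) 1).map
                (fun c => ((b.length : Int) - 1, c))).any
            (fun rc => (pvB_scan b p cw ((b.headD []).length : Int) (rc.1 + 1).toNat 0 rc.1 rc.2).isSome))
           then p else "⚪" := by
      rw [pv_alt_unfold, if_neg (by omega)]
    have hAltb' : check_left_diagonal_alt (split_board b true) p cw =
        if ((b.headD []).length : Int) - 1 ≤ 3 then "⚪"
        else if (((PySem.List.pyRange 0 (b.length : Int) 1).map (fun r => (r, (0 : Int)))
            ++ (PySem.List.pyRange 1 (((b.headD []).length : Int) - 1 - 3) 1).map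
                (fun c => ((b.length : Int) - 1, c))).any
            (fun rc => (pvB_scan (split_board b true) p cw (((b.headD []).length : Int) - 1)
                (rc.1 + 1).toNat 0 rc.1 rc.2).isSome))
           then p else "⚪" := by
      rw [pv_alt_unfold, hWb', hlen']
    obtain ⟨m, rfl⟩ : ∃ m, n = m + 1 := ⟨n - 1, by omega⟩
    rw [pvA_outer, if_pos (by omega)]
    have hfuel : m + 1 - 1 = m := rfl
    rw [hfuel] at IH
    rw [IH, hAltb', hAltb, pv_middle_eq b p cw b.length 0 (by omega)]
    set M : Bool := (PySem.List.pyRange 0 (b.length : Int) 1).any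
      (fun r => (pvB_scan b p cw ((b.headD []).length : Int) (r + 1).toNat 0 r 0).isSome) with hM
    set AB : Bool := (((PySem.List.pyRange 0 (b.length : Int) 1).map (fun r => (r, (0 : Int)))
        ++ (PySem.List.pyRange 1 (((b.headD []).length : Int) - 3) 1).map
            (fun c => ((b.length : Int) - 1, c))).any
        (fun rc => (pvB_scan b p cw ((b.headD []).length : Int) (rc.1 + 1).toNat 0 rc.1 rc.2).isSome)) with hAB
    set AB' : Bool := (((PySem.List.pyRange 0 (b.length : Int) 1).map (fun r => (r, (0 : Int)))
        ++ (PySem.List.pyRange 1 (((b.headD []).length : Int) - 1 - 3) 1).map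
            (fun c => ((b.length : Int) - 1, c))).any
        (fun rc => (pvB_scan (split_board b true) p cw (((b.headD []).length : Int) - 1)
            (rc.1 + 1).toNat 0 rc.1 rc.2).isSome)) with hAB'
    -- the key boolean fact
    have key : AB = true ↔ (M = true ∨ (4 < m + 1 ∧ AB' = true)) := by
      rw [hAB, hM, hAB']
      constructor
      · intro h
        obtain ⟨rc, hmem, hfire⟩ := List.any_eq_true.mp h
        rcases List.mem_append.mp hmem with hm1 | hm2
        · -- a left-column start fires: the middle loop finds it
          obtain ⟨r, hr, hrc⟩ := List.mem_map.mp hm1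
          rw [PySem.List.mem_pyRange_one] at hr
          left
          refine List.any_eq_true.mpr ⟨r, ?_, ?_⟩
          · rw [PySem.List.mem_pyRange_one]
            omega
          · rw [← hrc] at hfire
            exact hfire
        · -- a bottom-row start fires
          obtain ⟨c, hc, hrc⟩ := List.mem_map.mp hm2
          rw [PySem.List.mem_pyRange_one] at hc
          have hn5 : 5 ≤ m + 1 := by omega
          right
          refine ⟨by omega, ?_⟩
          rw [← hrc] at hfire
          by_cases hc1 : c = 1
          · -- the start (R-1, 1) is the left-column start R-1 of the stripped board
            refine List.any_eq_true.mpr ⟨((b.length : Int) - 1, (0 : Int)), ?_, ?_⟩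
            · refine List.mem_append.mpr (Or.inl (List.mem_map.mpr ⟨(b.length : Int) - 1, ?_, rfl⟩))
              rw [PySem.List.mem_pyRange_one]
              omega
            · show (pvB_scan (split_board b true) p cw (((b.headD []).length : Int) - 1) _ 0 _ 0).isSome = true
              rw [hshift _ _ 0 (by omega) (le_refl 0)]
              rw [hc1] at hfire
              exact hfire
          · -- otherwise it is the bottom-row start c-1 of the stripped board
            refine List.any_eq_true.mpr ⟨((b.length : Int) - 1, c - 1), ?_, ?_⟩
            · refine List.mem_append.mpr (Or.inr (List.mem_map.mpr ⟨c - 1, ?_, rfl⟩))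
              rw [PySem.List.mem_pyRange_one]
              omega
            · show (pvB_scan (split_board b true) p cw (((b.headD []).length : Int) - 1) _ 0 _ _).isSome = true
              rw [hshift _ _ _ (by omega) (by omega)]
              have hc1' : c - 1 + 1 = c := by omega
              rw [hc1']
              exact hfire
      · intro h
        rcases h with hm | ⟨hn5, hab'⟩
        · -- the middle loop fired on some left-column start
          obtain ⟨r, hr, hfire⟩ := List.any_eq_true.mp hm
          rw [PySem.List.mem_pyRange_one] at hr
          refine List.any_eq_true.mpr ⟨(r, (0 : Int)), ?_, ?_⟩
          · refine List.mem_append.mpr (Or.inl (List.mem_map.mpr ⟨r, ?_, rfl⟩))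
            rw [PySem.List.mem_pyRange_one]
            omega
          · exact hfire
        · -- the stripped board fired
          obtain ⟨rc, hmem, hfire⟩ := List.any_eq_true.mp hab'
          rcases List.mem_append.mp hmem with hm1 | hm2
          · obtain ⟨r, hr, hrc⟩ := List.mem_map.mp hm1
            rw [PySem.List.mem_pyRange_one] at hr
            rw [← hrc] at hfire
            rw [hshift _ _ 0 (by omega) (le_refl 0)] at hfire
            by_cases hlast : r = (b.length : Int) - 1
            · -- bottom-row start 1 of b
              refine List.any_eq_true.mpr ⟨((b.length : Int) - 1, (1 : Int)), ?_, ?_⟩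
              · refine List.mem_append.mpr (Or.inr (List.mem_map.mpr ⟨1, ?_, rfl⟩))
                rw [PySem.List.mem_pyRange_one]
                omega
              · show (pvB_scan b p cw ((b.headD []).length : Int) _ 0 _ _).isSome = true
                rw [← hlast]
                exact hfire
            · -- extend the diagonal one step down-left: left-column start r+1 of b
              refine List.any_eq_true.mpr ⟨(r + 1, (0 : Int)), ?_, ?_⟩
              · refine List.mem_append.mpr (Or.inl (List.mem_map.mpr ⟨r + 1, ?_, rfl⟩))
                rw [PySem.List.mem_pyRange_one]
                omega
              · show (pvB_scan b p cw ((b.headD []).length : Int) (r + 1 + 1).toNat 0 (r + 1) 0).isSome = true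
                have hstep := pv_scan_ext b p cw ((b.headD []).length : Int) (r + 1).toNat r 1 1 hfire
                rw [show r + ((1 : Nat) : Int) = r + 1 from by norm_num,
                    show (1 : Int) - ((1 : Nat) : Int) = 0 from by norm_num] at hstep
                rw [show (r + 1 + 1).toNat = (r + 1).toNat + 1 from by omega]
                exact hstep
          · obtain ⟨c, hc, hrc⟩ := List.mem_map.mp hm2
            rw [PySem.List.mem_pyRange_one] at hc
            rw [← hrc] at hfire
            rw [hshift _ _ _ (by omega) (by omega)] at hfire
            refine List.any_eq_true.mpr ⟨((b.length : Int) - 1, c + 1), ?_, ?_⟩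
            · refine List.mem_append.mpr (Or.inr (List.mem_map.mpr ⟨c + 1, ?_, rfl⟩))
              rw [PySem.List.mem_pyRange_one]
              omega
            · exact hfire
    -- finish by cases on the booleans
    by_cases hm' : M = true
    · rw [if_pos hm', if_pos (key.mpr (Or.inl hm'))]
    · rw [if_neg hm']
      by_cases h5 : m + 1 ≤ 4
      · rw [if_pos (by omega)]
        have hABf : AB ≠ true := by
          intro hab
          rcases key.mp hab with h | h
          · exact hm' h
          · omega
        rw [if_neg hABf]
      · rw [if_neg (by omega)]
        by_cases hab' : AB' = true
        · rw [if_pos hab', if_pos (key.mpr (Or.inr ⟨by omega, hab'⟩))]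
        · rw [if_neg hab']
          have hABf : AB ≠ true := by
            intro hab
            rcases key.mp hab with h | h
            · exact hm' h
            · exact hab' h.2
          rw [if_neg hABf]

-- ===== VERDICT (by name: the statement is the Claim_ definition above) =====
theorem check_left_diagonal_spec : Claim_equal_check_left_diagonal := by
  intro board player cw _ hpre
  unfold Spec_check_left_diagonal
  show pvA_outer player cw (board.headD []).length board = check_left_diagonal_alt board player cw
  obtain ⟨hb, hcase⟩ := hpre
  rcases hcase with h3 | hrows
  · have h2 : check_left_diagonal_alt board player cw = "⚪" := by
      rw [pv_alt_unfold, if_pos (by omega)]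
    rw [h2]
    cases hn : (board.headD []).length with
    | zero => rfl
    | succ m => rw [pvA_outer, if_neg (by rw [hn] at h3 ⊢; push_cast; omega)]
  · exact pv_main (board.headD []).length board player cw rfl hb hrows
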